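-- pv_equiv track=rewrite | github.com/gbyrd-research/autonomous-surgery | lift3d/dataset/chunk_wrapper.py | _build_episode_index_map_fixed
-- ===== SOURCE A (Python) =====
-- from typing import Any, Callable, Dict, List, Optional, Tuple, Union
--
-- def _build_episode_index_map_fixed(N: int, L: int) -> Dict[int, List[int]]:
--     """
--     Fixed-length episodes: episode 0 is indices [0..L-1], episode 1 is [L..2L-1], etc.
--     If N is not divisible by L, last episode will be shorter.
--     """
--     episode_to_indices: Dict[int, List[int]] = {}
--     ep = 0
--     start = 0
--     while start < N:
--         end = min(start + L, N)
--         episode_to_indices[ep] = list(range(start, end))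
--         ep += 1
--         start = end
--     return episode_to_indices
-- ===== SOURCE B (Python) =====
-- def _build_episode_index_map_fixed(N, L):
--     episode_to_indices = {}
--     for i in range(N):
--         episode_to_indices.setdefault(i // L, []).append(i)
--     return episode_to_indices
-- ===== Notes on version B (the rewrite author's own statement) =====
-- stated objective: alternative
-- what changed: Replaces A's while-loop that builds one contiguous range(start, end) block per episode with a single pass over every index i in range(N), bucketing i under key i // L via dict setdefault.
import Mathlib
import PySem

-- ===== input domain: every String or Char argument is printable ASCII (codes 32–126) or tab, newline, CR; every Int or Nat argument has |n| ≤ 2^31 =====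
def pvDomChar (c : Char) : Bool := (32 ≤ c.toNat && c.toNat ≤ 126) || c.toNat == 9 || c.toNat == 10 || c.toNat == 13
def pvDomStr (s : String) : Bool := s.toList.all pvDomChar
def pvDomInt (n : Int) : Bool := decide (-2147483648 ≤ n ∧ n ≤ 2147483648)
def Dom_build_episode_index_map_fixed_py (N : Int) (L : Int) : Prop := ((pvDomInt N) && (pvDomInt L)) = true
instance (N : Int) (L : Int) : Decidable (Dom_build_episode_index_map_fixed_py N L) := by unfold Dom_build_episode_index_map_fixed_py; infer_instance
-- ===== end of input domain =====

-- B replaces A's while-loop that materialises one contiguous block per episode with a single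
-- pass over all indices that buckets each i under i // L (dict setdefault); same return value
-- on the stated domain (objective: alternative decomposition, same cost).

-- ===== PORT A =====
-- A's while loop: ep/start/acc are exactly the Python loop state.  The '0 < L' conjunct in the
-- guard is a totality guard only: when L ≤ 0 and start < N the Python loop never terminates
-- (those inputs are outside Pre_ below), and it is what makes the recursion well-founded.
def pvALoop (N L : Int) (ep start : Int) (acc : PySem.Dict Int (List Int)) : PySem.Dict Int (List Int) :=
  if _hg : start < N ∧ 0 < L then
    pvALoop N L (ep + 1) (min (start + L) N)
      (acc.insert ep (PySem.List.pyRange start (min (start + L) N) 1))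
  else acc
termination_by (N - start).toNat
decreasing_by
  have h1 : start < min (start + L) N := by omega
  omega

def build_episode_index_map_fixed_py (N : Int) (L : Int) : List (Int × List Int) :=
  (pvALoop N L 0 0 PySem.Dict.empty).items

-- ===== PORT B =====
-- Source B: for i in range(N): episode_to_indices.setdefault(i // L, []).append(i)
-- (setdefault-then-append is exactly Dict.modify with default []).
def build_episode_index_map_fixed_py_alt (N : Int) (L : Int) : List (Int × List Int) :=
  ((PySem.List.pyRange 0 N 1).foldl
      (fun d i => d.modify (PySem.Int.floordiv i L) [] (fun l => l ++ [i]))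
      PySem.Dict.empty).items

-- ===== PRECONDITION & SPEC =====
-- Pre_ excludes only N > 0 with L ≤ 0: there A's while loop never terminates (start never
-- reaches N), so A returns on exactly the inputs admitted here.
def Pre_build_episode_index_map_fixed_py (N : Int) (L : Int) : Prop := N ≤ 0 ∨ 1 ≤ L
instance (N : Int) (L : Int) : Decidable (Pre_build_episode_index_map_fixed_py N L) := by
  unfold Pre_build_episode_index_map_fixed_py; infer_instance

def pvWitness_build_episode_index_map_fixed_py : Int × Int := (7, 3)

def Spec_build_episode_index_map_fixed_py (N : Int) (L : Int) (out : List (Int × List Int)) : Prop := out = build_episode_index_map_fixed_py_alt N L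
instance (N : Int) (L : Int) (out : List (Int × List Int)) : Decidable (Spec_build_episode_index_map_fixed_py N L out) := by unfold Spec_build_episode_index_map_fixed_py; infer_instance

-- ===== CLAIM (what is proved, stated in full; the proofs are below) =====
def Claim_equal_build_episode_index_map_fixed_py : Prop := ∀ (N : Int) (L : Int), Dom_build_episode_index_map_fixed_py N L → Pre_build_episode_index_map_fixed_py N L → Spec_build_episode_index_map_fixed_py N L (build_episode_index_map_fixed_py N L)

-- ===== LEMMAS AND PROOFS =====

-- B's loop step, named for the proofs.
def pvBStep (L : Int) (d : PySem.Dict Int (List Int)) (i : Int) : PySem.Dict Int (List Int) :=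
  d.modify (PySem.Int.floordiv i L) [] (fun l => l ++ [i])

lemma pvBStep_eq (L : Int) (d : PySem.Dict Int (List Int)) (i : Int) :
    pvBStep L d i = d.insert (PySem.Int.floordiv i L) (d.getD (PySem.Int.floordiv i L) [] ++ [i]) := rfl

-- Folding B's step over indices that all belong to episode ep just extends ep's bucket.
lemma pvChunk (L : Int) (ep : Int) :
    ∀ (k : Nat) (j e : Int), (e - j).toNat = k →
      (∀ i : Int, j ≤ i → i < e → PySem.Int.floordiv i L = ep) →
      ∀ (acc : PySem.Dict Int (List Int)) (R : List Int),
        (PySem.List.pyRange j e 1).foldl (pvBStep L) (acc.insert ep R)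
          = acc.insert ep (R ++ PySem.List.pyRange j e 1) := by
  intro k
  induction k with
  | zero =>
      intro j e hk _ acc R
      have he : e ≤ j := by omega
      simp [PySem.List.pyRange_one_eq_nil he]
  | succ k ih =>
      intro j e hk hdiv acc R
      have hj : j < e := by omega
      rw [PySem.List.pyRange_one_cons hj]
      simp only [List.foldl_cons]
      have hstep : pvBStep L (acc.insert ep R) j = acc.insert ep (R ++ [j]) := by
        rw [pvBStep_eq, hdiv j le_rfl hj, PySem.Dict.getD_insert_self,
          PySem.Dict.insert_insert_self]
      rw [hstep, ih (j + 1) e (by omega)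
        (fun i _ h2 => hdiv i (by omega) h2) acc (R ++ [j])]
      simp

-- Main invariant: from loop state (ep, start = min(ep·L, N)) with no key ≥ ep present yet,
-- B's fold over the remaining indices computes exactly what A's remaining loop computes.
lemma pvMain (N L : Int) (hL : 0 < L) :
    ∀ (k : Nat) (ep start : Int), (N - start).toNat = k →
      start = min (ep * L) N →
      ∀ (acc : PySem.Dict Int (List Int)), (∀ e : Int, ep ≤ e → acc.contains e = false) →
        (PySem.List.pyRange start N 1).foldl (pvBStep L) acc = pvALoop N L ep start acc := by
  intro k
  induction k using Nat.strong_induction_on with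
  | _ k ih =>
      intro ep start hk hstart acc hacc
      by_cases hlt : start < N
      · have hse : start = ep * L := by omega
        set e := min (start + L) N with hedef
        have hepL : ep * L + L = (ep + 1) * L := by ring
        have he1 : start < e := by omega
        have he2 : e ≤ N := by omega
        have he3 : e ≤ (ep + 1) * L := by omega
        -- split the remaining indices at the end of episode ep
        rw [PySem.List.pyRange_one_append start e N (by omega) he2, List.foldl_append]
        -- first index of the chunk opens ep's bucket
        rw [PySem.List.pyRange_one_cons he1]
        simp only [List.foldl_cons]
        have hd0 : PySem.Int.floordiv start L = ep := by
          rw [PySem.Int.floordiv_eq_iff_of_pos hL]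
          constructor
          · omega
          · omega
        have hstep : pvBStep L acc start = acc.insert ep [start] := by
          rw [pvBStep_eq, hd0, PySem.Dict.getD_of_not_contains acc [] (hacc ep le_rfl)]
          rfl
        rw [hstep,
          pvChunk L ep (e - (start + 1)).toNat (start + 1) e rfl
            (fun i h1 h2 => by
              rw [PySem.Int.floordiv_eq_iff_of_pos hL]; constructor
              · omega
              · omega)
            acc [start]]
        have hrange : ([start] : List Int) ++ PySem.List.pyRange (start + 1) e 1
            = PySem.List.pyRange start e 1 := by
          rw [PySem.List.pyRange_one_cons he1]; rfl
        rw [hrange]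
        -- the tail of the fold is the rest of A's loop, by the induction hypothesis
        have hrec := ih (N - e).toNat (by omega) (ep + 1) e (by omega) (by omega)
          (acc.insert ep (PySem.List.pyRange start e 1))
          (fun e' he' => by
            rw [PySem.Dict.contains_insert]
            have : (e' == ep) = false := by simp; omega
            rw [this, hacc e' (by omega)]
            rfl)
        rw [hrec]
        -- and A's loop unfolds one step to the same call
        conv_rhs => rw [pvALoop]
        rw [dif_pos ⟨hlt, hL⟩]
      · have hnil : PySem.List.pyRange start N 1 = [] :=
          PySem.List.pyRange_one_eq_nil (by omega)
        rw [hnil]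
        rw [pvALoop, dif_neg (by omega)]
        rfl

-- ===== VERDICT (by name: the statement is the Claim_ definition above) =====
theorem build_episode_index_map_fixed_py_spec : Claim_equal_build_episode_index_map_fixed_py := by
  intro N L _ hpre
  unfold Spec_build_episode_index_map_fixed_py
  unfold build_episode_index_map_fixed_py build_episode_index_map_fixed_py_alt
  by_cases hN : N ≤ 0
  · rw [pvALoop, dif_neg (by omega), PySem.List.pyRange_one_eq_nil hN]
    rfl
  · have hL : 0 < L := by
      rcases hpre with h | h
      · omega
      · omega
    rw [← pvMain N L hL (N - 0).toNat 0 0 rfl (by omega) PySem.Dict.empty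
      (fun e _ => PySem.Dict.contains_empty e)]
    rfl
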